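-- pv_equiv track=rewrite | github.com/ckinpdx/ComfyUI-LTXAVTools | nodes/av_looping_sampler.py | _calculate_keyframe_per_tile_indices
-- ===== SOURCE A (Python) =====
-- def _calculate_keyframe_per_tile_indices(keyframe_indices,
--                                           temporal_tile_size, temporal_overlap,
--                                           num_frames):
--     result = []
--     for kf in keyframe_indices:
--         if kf >= num_frames:
--             continue
--         if kf < temporal_tile_size - 7:
--             result.append((0, kf))
--             continue
--         tile_step  = temporal_tile_size - temporal_overlap
--         tile_index = 1
--         while True:
--             tile_start = tile_index * tile_step - 7
--             tile_end   = temporal_tile_size + tile_index * tile_step - 1 - 7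
--             if kf <= tile_end:
--                 in_tile = kf - tile_start - 7
--                 if in_tile < temporal_overlap:
--                     tile_index -= 1
--                     if tile_index == 0:
--                         in_tile = kf
--                     else:
--                         in_tile = kf - (tile_start - tile_step) - 7
--                 result.append((tile_index, in_tile))
--                 break
--             tile_index += 1
--     return result
-- ===== SOURCE B (Python) =====
-- def _calculate_keyframe_per_tile_indices(keyframe_indices,
--                                           temporal_tile_size, temporal_overlap,
--                                           num_frames):
--     step = temporal_tile_size - temporal_overlap
--     result = []
--     for kf in keyframe_indices:
--         if kf >= num_frames:
--             continue
--         if kf < temporal_tile_size - 7: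
--             result.append((0, kf))
--             continue
--         # closed-form: smallest tile_index i >= 1 with kf <= tile_end(i)
--         i = -((-(kf - temporal_tile_size + 8)) // step)
--         if kf - i * step < temporal_overlap:
--             i -= 1
--         result.append((i, kf if i == 0 else kf - i * step))
--     return result
-- ===== Notes on version B (the rewrite author's own statement) =====
-- stated objective: alternative
-- what changed: B replaces A's per-keyframe while-loop scan over tile indices with a closed-form ceiling division that yields the tile index directly.
import Mathlib
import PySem

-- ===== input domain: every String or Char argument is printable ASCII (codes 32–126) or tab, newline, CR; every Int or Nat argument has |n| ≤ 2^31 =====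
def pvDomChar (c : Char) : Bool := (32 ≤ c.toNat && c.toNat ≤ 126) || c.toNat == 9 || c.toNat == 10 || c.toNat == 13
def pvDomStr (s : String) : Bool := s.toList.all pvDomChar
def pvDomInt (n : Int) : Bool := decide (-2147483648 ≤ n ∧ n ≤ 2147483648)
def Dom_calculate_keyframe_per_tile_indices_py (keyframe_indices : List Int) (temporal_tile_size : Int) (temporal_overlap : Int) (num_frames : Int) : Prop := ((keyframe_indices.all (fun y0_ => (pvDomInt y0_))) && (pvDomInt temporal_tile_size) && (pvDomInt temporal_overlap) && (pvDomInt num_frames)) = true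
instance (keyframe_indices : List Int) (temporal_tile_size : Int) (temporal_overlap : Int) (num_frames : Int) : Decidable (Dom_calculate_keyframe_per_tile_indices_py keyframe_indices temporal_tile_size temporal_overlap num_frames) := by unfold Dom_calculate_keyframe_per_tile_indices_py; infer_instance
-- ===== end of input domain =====

-- B replaces A's per-keyframe while-loop scan over tile indices with a closed-form
-- ceiling division (objective: alternative; removes the unbounded scan).
-- ===== PORT A =====
-- A's inner 'while True' loop; fuel makes it total (under Pre_ the fuel is never exhausted).
def pvLoopA (kf size overlap step : Int) : Nat -> Int -> Int × Int
  | 0, tile_index => (tile_index, 0)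
  | fuel+1, tile_index =>
    let tile_start := tile_index * step - 7
    let tile_end := size + tile_index * step - 1 - 7
    if kf ≤ tile_end then
      let in_tile := kf - tile_start - 7
      if in_tile < overlap then
        if tile_index - 1 = 0 then (tile_index - 1, kf)
        else (tile_index - 1, kf - (tile_start - step) - 7)
      else (tile_index, in_tile)
    else pvLoopA kf size overlap step fuel (tile_index + 1)

def calculate_keyframe_per_tile_indices_py (keyframe_indices : List Int) (temporal_tile_size : Int) (temporal_overlap : Int) (num_frames : Int) : List (Int × Int) :=
  keyframe_indices.foldl (fun result kf =>
    if num_frames ≤ kf then result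
    else if kf < temporal_tile_size - 7 then result ++ [((0 : Int), kf)]
    else
      let tile_step := temporal_tile_size - temporal_overlap
      result ++ [pvLoopA kf temporal_tile_size temporal_overlap tile_step
                  ((kf - temporal_tile_size + 8).toNat + 1) 1]) []

-- ===== PORT B =====
def calculate_keyframe_per_tile_indices_py_alt (keyframe_indices : List Int) (temporal_tile_size : Int) (temporal_overlap : Int) (num_frames : Int) : List (Int × Int) :=
  let step := temporal_tile_size - temporal_overlap
  keyframe_indices.foldl (fun result kf =>
    if num_frames ≤ kf then result
    else if kf < temporal_tile_size - 7 then result ++ [((0 : Int), kf)]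
    else
      let i0 := -(PySem.Int.floordiv (-(kf - temporal_tile_size + 8)) step)
      let i := if kf - i0 * step < temporal_overlap then i0 - 1 else i0
      result ++ [(i, if i = 0 then kf else kf - i * step)]) []

-- ===== PRECONDITION & SPEC =====
-- Pre_ excludes exactly the inputs on which A never returns: when the tile step
-- temporal_tile_size - temporal_overlap is ≤ 0 and some keyframe reaches the while
-- loop, A's loop (and B's division, when step = 0) never finds a tile and A hangs.
def Pre_calculate_keyframe_per_tile_indices_py (keyframe_indices : List Int) (temporal_tile_size : Int) (temporal_overlap : Int) (num_frames : Int) : Prop :=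
  1 ≤ temporal_tile_size - temporal_overlap ∨
    ∀ kf ∈ keyframe_indices, num_frames ≤ kf ∨ kf < temporal_tile_size - 7
instance (keyframe_indices : List Int) (temporal_tile_size : Int) (temporal_overlap : Int) (num_frames : Int) : Decidable (Pre_calculate_keyframe_per_tile_indices_py keyframe_indices temporal_tile_size temporal_overlap num_frames) := by unfold Pre_calculate_keyframe_per_tile_indices_py; infer_instance

def pvWitness_calculate_keyframe_per_tile_indices_py : List Int × Int × Int × Int :=
  ([0, 10, 20, 35], 16, 4, 30)

def Spec_calculate_keyframe_per_tile_indices_py (keyframe_indices : List Int) (temporal_tile_size : Int) (temporal_overlap : Int) (num_frames : Int) (out : List (Int × Int)) : Prop := out = calculate_keyframe_per_tile_indices_py_alt keyframe_indices temporal_tile_size temporal_overlap num_frames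
instance (keyframe_indices : List Int) (temporal_tile_size : Int) (temporal_overlap : Int) (num_frames : Int) (out : List (Int × Int)) : Decidable (Spec_calculate_keyframe_per_tile_indices_py keyframe_indices temporal_tile_size temporal_overlap num_frames out) := by unfold Spec_calculate_keyframe_per_tile_indices_py; infer_instance

-- ===== CLAIM (what is proved, stated in full; the proofs are below) =====
def Claim_equal_calculate_keyframe_per_tile_indices_py : Prop := ∀ (keyframe_indices : List Int) (temporal_tile_size : Int) (temporal_overlap : Int) (num_frames : Int), Dom_calculate_keyframe_per_tile_indices_py keyframe_indices temporal_tile_size temporal_overlap num_frames → Pre_calculate_keyframe_per_tile_indices_py keyframe_indices temporal_tile_size temporal_overlap num_frames → Spec_calculate_keyframe_per_tile_indices_py keyframe_indices temporal_tile_size temporal_overlap num_frames (calculate_keyframe_per_tile_indices_py keyframe_indices temporal_tile_size temporal_overlap num_frames)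

-- ===== LEMMAS AND PROOFS =====

-- The loop, run with enough fuel from any index 1 ≤ i ≤ i0 (i0 = first index whose
-- tile contains kf), lands exactly on index i0 and returns A's branch there.
theorem pvLoopA_run (kf size overlap step i0 : Int) (hs : 0 < step)
    (h1 : kf - size + 8 ≤ i0 * step) (h2 : (i0 - 1) * step < kf - size + 8) :
    ∀ (fuel : Nat) (i : Int), 1 ≤ i → i ≤ i0 → i0 - i < fuel →
    pvLoopA kf size overlap step fuel i =
      (if kf - (i0 * step - 7) - 7 < overlap then
        (if i0 - 1 = 0 then (i0 - 1, kf) else (i0 - 1, kf - (i0 * step - 7 - step) - 7))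
       else (i0, kf - (i0 * step - 7) - 7)) := by
  intro fuel
  induction fuel with
  | zero => intro i _ _ h; omega
  | succ n ih =>
    intro i hi1 hii0 hfuel
    by_cases hle : kf ≤ size + i * step - 1 - 7
    · have hge : i0 ≤ i := by
        by_contra hlt
        push Not at hlt
        have : i * step ≤ (i0 - 1) * step :=
          mul_le_mul_of_nonneg_right (by omega) hs.le
        omega
      have hie : i = i0 := le_antisymm hii0 hge
      subst hie
      simp only [pvLoopA, if_pos hle]
    · have hlt : i < i0 := by
        by_contra hge
        push Not at hge
        have : i0 * step ≤ i * step :=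
          mul_le_mul_of_nonneg_right hge hs.le
        omega
      simp only [pvLoopA, if_neg hle]
      exact ih (i + 1) (by omega) (by omega) (by omega)

-- per-keyframe equality of A's loop result with B's closed form, when step ≥ 1
theorem body_eq (kf size overlap : Int) (hs : 1 ≤ size - overlap) (hk : size - 7 ≤ kf) :
    pvLoopA kf size overlap (size - overlap) ((kf - size + 8).toNat + 1) 1 =
      (let i0 := -(PySem.Int.floordiv (-(kf - size + 8)) (size - overlap))
       let i := if kf - i0 * (size - overlap) < overlap then i0 - 1 else i0
       (i, if i = 0 then kf else kf - i * (size - overlap))) := by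
  set step := size - overlap with hstep
  have hs0 : 0 < step := by omega
  set c := kf - size + 8 with hc
  have hc1 : 1 ≤ c := by omega
  set i0 := -(PySem.Int.floordiv (-c) step) with hi0
  have hchar : (i0 - 1) * step < c ∧ c ≤ i0 * step :=
    (PySem.Int.neg_floordiv_neg_eq_iff_of_pos hs0).mp rfl
  have h1 : c ≤ i0 * step := hchar.2
  have h2 : (i0 - 1) * step < c := hchar.1
  have hi0pos : 1 ≤ i0 := by
    by_contra h
    push Not at h
    have : i0 * step ≤ 0 * step := mul_le_mul_of_nonneg_right (by omega) hs0.le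
    omega
  have hi0c : i0 ≤ c := by
    have := h2
    nlinarith
  rw [pvLoopA_run kf size overlap step i0 hs0 h1 h2 ((kf - size + 8).toNat + 1) 1
      le_rfl hi0pos (by omega)]
  simp only []
  by_cases hov : kf - i0 * step < overlap
  · rw [if_pos (by omega : kf - (i0 * step - 7) - 7 < overlap), if_pos hov]
    by_cases hz : i0 - 1 = 0
    · rw [if_pos hz, if_pos hz]
    · rw [if_neg hz, if_neg hz, Prod.mk.injEq]
      exact ⟨rfl, by ring⟩
  · rw [if_neg (by omega : ¬ kf - (i0 * step - 7) - 7 < overlap), if_neg hov]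
    have : ¬ i0 = 0 := by omega
    rw [if_neg this, Prod.mk.injEq]
    exact ⟨rfl, by ring⟩

-- ===== VERDICT (by name: the statement is the Claim_ definition above) =====
theorem calculate_keyframe_per_tile_indices_py_spec : Claim_equal_calculate_keyframe_per_tile_indices_py := by
  intro kfs size overlap nf _ hpre
  unfold Spec_calculate_keyframe_per_tile_indices_py
  unfold calculate_keyframe_per_tile_indices_py calculate_keyframe_per_tile_indices_py_alt
  simp only []
  apply Eq.symm
  apply PySem.List.foldl_congr_mem
  intro acc kf hmem
  by_cases h1 : nf ≤ kf
  · simp [h1]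
  · by_cases h2 : kf < size - 7
    · simp [h1, h2]
    · rcases hpre with hs | hall
      · simp only [if_neg h1, if_neg h2]
        rw [body_eq kf size overlap hs (by omega)]
      · exact absurd (hall kf hmem) (by omega)
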